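-- pv_equiv track=rewrite | github.com/KviteYT/app | algobygpt.py | memory_compatible
-- ===== SOURCE A (Python) =====
-- def memory_compatible(mb_memory_value, ram_items):
--     """
--     Проверяет совместимость типов памяти между материнской платой и оперативной памятью.
--     - mb_memory_value: строка, содержащая тип памяти материнской платы (например, "2x DDR4").
--     - ram_items: список модулей оперативной памяти (из таблицы items).
--     """
--     # Извлекаем тип памяти из строки материнской платы
--     mb_memory_type = None
--     for mem_type in ["DDR5", "DDR4", "DDR3", "DDR2"]:
--         if mem_type in mb_memory_value.upper():
--             mb_memory_type = mem_type
--             break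
--
--     if not mb_memory_type:
--         return False  # Тип памяти на материнской плате не указан
--
--     # Сопоставляем тип памяти оперативной памяти из модели
--     for ram_item in ram_items:
--         _, _, ram_model, _, _, _ = ram_item  # Извлекаем модель оперативной памяти
--         for mem_type in ["DDR5", "DDR4", "DDR3", "DDR2"]:
--             if mem_type in ram_model.upper():
--                 ram_memory_type = mem_type
--                 # Проверяем совместимость (новый тип памяти поддерживает старые)
--                 if mem_type_compatible(mb_memory_type, ram_memory_type):
--                     return True
--
--     return False
--
-- def mem_type_compatible(mb_type, ram_type):
--     """
--     Определяет, совместимы ли типы памяти, учитывая, что более новые типы поддерживают более старые.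
--     """
--     memory_hierarchy = ["DDR2", "DDR3", "DDR4", "DDR5"]  # От старого к новому
--     return memory_hierarchy.index(mb_type) >= memory_hierarchy.index(ram_type)
-- ===== SOURCE B (Python) =====
-- def memory_compatible(mb_memory_value, ram_items):
--     def ddr_digits(s):
--         # one linear window scan extracting the numeric generation of every "DDR<d>" occurrence
--         u = s.upper()
--         ds = []
--         for i in range(len(u) - 3):
--             if u[i:i+3] == "DDR" and u[i+3] in "2345":
--                 ds.append(int(u[i+3]))
--         return ds
--     mb_ds = ddr_digits(mb_memory_value)
--     if not mb_ds:
--         return False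
--     mb = max(mb_ds)
--     for _, _, model, _, _, _ in ram_items:
--         ds = ddr_digits(model)
--         if ds and min(ds) <= mb:
--             return True
--     return False
-- ===== Notes on version B (the rewrite author's own statement) =====
-- stated objective: alternative
-- what changed: B drops the fixed type-string membership tests and the hierarchy-index helper entirely: it does one linear window scan of each string extracting the numeric generation digit of every 'DDR<d>' occurrence, then compares the motherboard's max digit against each module's min digit.
import Mathlib
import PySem

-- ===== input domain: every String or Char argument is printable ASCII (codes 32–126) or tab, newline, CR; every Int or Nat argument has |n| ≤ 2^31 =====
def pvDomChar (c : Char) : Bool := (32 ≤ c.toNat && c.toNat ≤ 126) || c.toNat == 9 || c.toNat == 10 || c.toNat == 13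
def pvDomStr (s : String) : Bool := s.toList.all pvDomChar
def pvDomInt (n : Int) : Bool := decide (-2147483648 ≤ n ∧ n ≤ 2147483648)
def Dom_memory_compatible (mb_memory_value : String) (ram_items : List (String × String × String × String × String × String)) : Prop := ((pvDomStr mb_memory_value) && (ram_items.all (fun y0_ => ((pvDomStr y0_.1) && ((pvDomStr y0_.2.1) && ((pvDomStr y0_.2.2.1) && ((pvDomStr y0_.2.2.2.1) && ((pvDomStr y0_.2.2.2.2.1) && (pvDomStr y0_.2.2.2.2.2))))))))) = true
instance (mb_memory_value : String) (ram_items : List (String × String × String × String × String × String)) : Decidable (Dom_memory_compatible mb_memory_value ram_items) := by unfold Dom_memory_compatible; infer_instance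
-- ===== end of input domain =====

-- B replaces A's fixed-type-string membership tests and hierarchy-index helper with a single
-- window scan extracting the numeric generation digit of every "DDR<d>" occurrence, comparing
-- the motherboard's max digit with each module's min digit; same return value, similar cost.

-- ===== PORT A =====
-- helper: mem_type_compatible from the Python module (list.index comparison on the hierarchy)
def mem_type_compatible (mb_type : String) (ram_type : String) : Bool :=
  match PySem.List.index? ["DDR2", "DDR3", "DDR4", "DDR5"] mb_type,
        PySem.List.index? ["DDR2", "DDR3", "DDR4", "DDR5"] ram_type with
  | some i, some j => j ≤ i
  | _, _ => false   -- Python would raise ValueError; unreachable: callers pass hierarchy members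

-- A's motherboard-detection loop: first mem_type contained in the uppercased string
def pvDetectA : List String → String → Option String
  | [], _ => none
  | t :: ts, s => if PySem.Str.isIn t s then some t else pvDetectA ts s

-- A's inner loop over the DDR type list for one ram model
def pvInnerA (mb_type : String) : List String → String → Bool
  | [], _ => false
  | t :: ts, model =>
    if PySem.Str.isIn t (PySem.Str.upper model) then
      (if mem_type_compatible mb_type t then true else pvInnerA mb_type ts model)
    else pvInnerA mb_type ts model

-- A's outer loop over ram_items
def pvOuterA (mb_type : String) : List (String × String × String × String × String × String) → Bool
  | [] => false
  | item :: rest =>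
    if pvInnerA mb_type ["DDR5", "DDR4", "DDR3", "DDR2"] item.2.2.1 then true
    else pvOuterA mb_type rest

def memory_compatible (mb_memory_value : String) (ram_items : List (String × String × String × String × String × String)) : Bool :=
  match pvDetectA ["DDR5", "DDR4", "DDR3", "DDR2"] (PySem.Str.upper mb_memory_value) with
  | none => false
  | some mb_type => pvOuterA mb_type ram_items

-- ===== PORT B =====
-- B's ddr_digits window scan: for each position, if the 4-char window is "DDR"+digit∈"2345",
-- emit the digit's value; advance one char (the Python index loop on the uppercased string).
def pvDdrScan : List Char → List Int
  | a :: b :: c :: d :: rest =>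
      (if a = 'D' ∧ b = 'D' ∧ c = 'R' ∧ (d = '2' ∨ d = '3' ∨ d = '4' ∨ d = '5')
       then [(d.toNat : Int) - 48] else []) ++ pvDdrScan (b :: c :: d :: rest)
  | _ => []

def memory_compatible_alt (mb_memory_value : String) (ram_items : List (String × String × String × String × String × String)) : Bool :=
  let mb_ds := pvDdrScan (PySem.Str.upper mb_memory_value).toList
  match PySem.List.max? mb_ds (fun x => x) with
  | none => false
  | some mbMax =>
    ram_items.any (fun item =>
      let ds := pvDdrScan (PySem.Str.upper item.2.2.1).toList
      match PySem.List.min? ds (fun x => x) with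
      | some mn => decide (mn ≤ mbMax)
      | none => false)

-- ===== PRECONDITION & SPEC =====
def Spec_memory_compatible (mb_memory_value : String) (ram_items : List (String × String × String × String × String × String)) (out : Bool) : Prop := out = memory_compatible_alt mb_memory_value ram_items
instance (mb_memory_value : String) (ram_items : List (String × String × String × String × String × String)) (out : Bool) : Decidable (Spec_memory_compatible mb_memory_value ram_items out) := by unfold Spec_memory_compatible; infer_instance

-- ===== CLAIM (what is proved, stated in full; the proofs are below) =====
def Claim_equal_memory_compatible : Prop := ∀ (mb_memory_value : String) (ram_items : List (String × String × String × String × String × String)), Dom_memory_compatible mb_memory_value ram_items → Spec_memory_compatible mb_memory_value ram_items (memory_compatible mb_memory_value ram_items)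

-- ===== LEMMAS AND PROOFS =====

-- every value the scan emits is one of 2,3,4,5
theorem pvDdrScan_bounds : ∀ (l : List Char), ∀ v ∈ pvDdrScan l, v = 2 ∨ v = 3 ∨ v = 4 ∨ v = 5 := by
  intro l
  induction l with
  | nil => intro v hv; simp [pvDdrScan] at hv
  | cons a t ih =>
    match t, ih with
    | [], _ => intro v hv; simp [pvDdrScan] at hv
    | [b], _ => intro v hv; simp [pvDdrScan] at hv
    | [b, c], _ => intro v hv; simp [pvDdrScan] at hv
    | b :: c :: d :: rest, ih =>
      intro v hv
      rw [pvDdrScan] at hv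
      rcases List.mem_append.1 hv with h | h
      · split at h
        · next hw =>
          rcases hw.2.2.2 with h4 | h4 | h4 | h4 <;>
            simp [h4] at h <;> simp [h]
        · simp at h
      · exact ih v h

-- membership of digit value in the scan ↔ "DDR<c>" is an infix (for one of the four digit chars)
theorem mem_pvDdrScan_iff (c : Char) (hc : c = '2' ∨ c = '3' ∨ c = '4' ∨ c = '5') :
    ∀ (l : List Char), ((c.toNat : Int) - 48) ∈ pvDdrScan l ↔ ['D', 'D', 'R', c] <:+: l := by
  intro l
  induction l with
  | nil =>
    constructor
    · intro h; simp [pvDdrScan] at h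
    · intro h; have := h.length_le; simp at this
  | cons a t ih =>
    match t, ih with
    | [], _ =>
      constructor
      · intro h; simp [pvDdrScan] at h
      · intro h; have := h.length_le; simp at this
    | [b], _ =>
      constructor
      · intro h; simp [pvDdrScan] at h
      · intro h; have := h.length_le; simp at this
    | [b, c'], _ =>
      constructor
      · intro h; simp [pvDdrScan] at h
      · intro h; have := h.length_le; simp at this
    | b :: c' :: d :: rest, ih =>
      rw [pvDdrScan, List.mem_append, List.infix_cons_iff]
      constructor
      · rintro (h | h)
        · split at h
          · next hw =>
            obtain ⟨ha, hb, hcR, hd⟩ := hw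
            simp at h
            have hdc : d = c := by
              rcases hd with h4 | h4 | h4 | h4 <;> rcases hc with h5 | h5 | h5 | h5 <;>
                subst h4 <;> subst h5 <;> first | rfl | (exfalso; revert h; decide)
            left
            subst ha hb hcR hdc
            exact ⟨rest, rfl⟩
          · simp at h
        · exact Or.inr (ih.1 h)
      · rintro (h | h)
        · obtain ⟨s, hs⟩ := h
          cases hs
          left
          have : (if ('D' = 'D' ∧ 'D' = 'D' ∧ 'R' = 'R' ∧ (c = '2' ∨ c = '3' ∨ c = '4' ∨ c = '5'))
              then [((c.toNat : Int) - 48)] else ([] : List Int)) = [((c.toNat : Int) - 48)] := by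
            simp [hc]
          rw [this]; simp
        · exact Or.inr (ih.2 h)

theorem mem_scan_5 (s : String) : ((5:Int) ∈ pvDdrScan s.toList) = (PySem.Str.isIn "DDR5" s = true) := by
  have h := mem_pvDdrScan_iff '5' (by simp) s.toList
  have e : (('5'.toNat : Int) - 48) = 5 := by decide
  rw [e] at h
  simp only [PySem.Str.isIn_iff_infix]
  simp [h]


theorem mem_scan_4 (s : String) : ((4:Int) ∈ pvDdrScan s.toList) = (PySem.Str.isIn "DDR4" s = true) := by
  have h := mem_pvDdrScan_iff '4' (by simp) s.toList
  have e : (('4'.toNat : Int) - 48) = 4 := by decide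
  rw [e] at h
  simp only [PySem.Str.isIn_iff_infix]
  simp [h]

theorem mem_scan_3 (s : String) : ((3:Int) ∈ pvDdrScan s.toList) = (PySem.Str.isIn "DDR3" s = true) := by
  have h := mem_pvDdrScan_iff '3' (by simp) s.toList
  have e : (('3'.toNat : Int) - 48) = 3 := by decide
  rw [e] at h
  simp only [PySem.Str.isIn_iff_infix]
  simp [h]

theorem mem_scan_2 (s : String) : ((2:Int) ∈ pvDdrScan s.toList) = (PySem.Str.isIn "DDR2" s = true) := by
  have h := mem_pvDdrScan_iff '2' (by simp) s.toList
  have e : (('2'.toNat : Int) - 48) = 2 := by decide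
  rw [e] at h
  simp only [PySem.Str.isIn_iff_infix]
  simp [h]

-- Python max(l) of a nonempty list whose maximum is k
theorem pvMax?_eq (l : List Int) (k : Int) (hk : k ∈ l) (hub : ∀ v ∈ l, v ≤ k) :
    PySem.List.max? l (fun x => x) = some k := by
  cases h : PySem.List.max? l (fun x => x) with
  | none =>
    rw [PySem.List.max?_eq_none_iff] at h
    subst h; simp at hk
  | some m =>
    have hm : m ∈ l := PySem.List.max?_mem h
    have h1 : k ≤ m := PySem.List.max?_isMax h k hk
    have h2 : m ≤ k := hub m hm
    exact congrArg some (le_antisymm h2 h1)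

-- Python's "ds and min(ds) <= K" as an existential
theorem pvMinTest (ds : List Int) (K : Int) :
    (match PySem.List.min? ds (fun x => x) with
     | some mn => decide (mn ≤ K)
     | none => false)
    = decide (∃ v ∈ ds, v ≤ K) := by
  cases h : PySem.List.min? ds (fun x => x) with
  | none =>
    rw [PySem.List.min?_eq_none_iff] at h
    subst h; simp
  | some mn =>
    have hm : mn ∈ ds := PySem.List.min?_mem h
    have hmin : ∀ y ∈ ds, mn ≤ y := PySem.List.min?_isMin h
    simp only []
    rw [decide_eq_decide]
    constructor
    · intro hle; exact ⟨mn, hm, hle⟩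
    · rintro ⟨v, hv, hvK⟩; exact le_trans (hmin v hv) hvK

-- pvInnerA at each concrete motherboard type equals B's "any allowed substring" test
theorem innerA_DDR5 (m : String) : pvInnerA "DDR5" ["DDR5", "DDR4", "DDR3", "DDR2"] m = (["DDR2", "DDR3", "DDR4", "DDR5"].any (fun t => PySem.Str.isIn t (PySem.Str.upper m))) := by
  simp only [pvInnerA, mem_type_compatible, List.any]
  cases h5 : PySem.Str.isIn "DDR5" (PySem.Str.upper m) <;>
  cases h4 : PySem.Str.isIn "DDR4" (PySem.Str.upper m) <;>
  cases h3 : PySem.Str.isIn "DDR3" (PySem.Str.upper m) <;>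
  cases h2 : PySem.Str.isIn "DDR2" (PySem.Str.upper m) <;> (try simp [h5, h4, h3, h2]) <;> decide

theorem innerA_DDR4 (m : String) : pvInnerA "DDR4" ["DDR5", "DDR4", "DDR3", "DDR2"] m = (["DDR2", "DDR3", "DDR4"].any (fun t => PySem.Str.isIn t (PySem.Str.upper m))) := by
  simp only [pvInnerA, mem_type_compatible, List.any]
  cases h5 : PySem.Str.isIn "DDR5" (PySem.Str.upper m) <;>
  cases h4 : PySem.Str.isIn "DDR4" (PySem.Str.upper m) <;>
  cases h3 : PySem.Str.isIn "DDR3" (PySem.Str.upper m) <;>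
  cases h2 : PySem.Str.isIn "DDR2" (PySem.Str.upper m) <;> (try simp [h5, h4, h3, h2]) <;> decide

theorem innerA_DDR3 (m : String) : pvInnerA "DDR3" ["DDR5", "DDR4", "DDR3", "DDR2"] m = (["DDR2", "DDR3"].any (fun t => PySem.Str.isIn t (PySem.Str.upper m))) := by
  simp only [pvInnerA, mem_type_compatible, List.any]
  cases h5 : PySem.Str.isIn "DDR5" (PySem.Str.upper m) <;>
  cases h4 : PySem.Str.isIn "DDR4" (PySem.Str.upper m) <;>
  cases h3 : PySem.Str.isIn "DDR3" (PySem.Str.upper m) <;>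
  cases h2 : PySem.Str.isIn "DDR2" (PySem.Str.upper m) <;> (try simp [h5, h4, h3, h2]) <;> decide

theorem innerA_DDR2 (m : String) : pvInnerA "DDR2" ["DDR5", "DDR4", "DDR3", "DDR2"] m = (["DDR2"].any (fun t => PySem.Str.isIn t (PySem.Str.upper m))) := by
  simp only [pvInnerA, mem_type_compatible, List.any]
  cases h5 : PySem.Str.isIn "DDR5" (PySem.Str.upper m) <;>
  cases h4 : PySem.Str.isIn "DDR4" (PySem.Str.upper m) <;>
  cases h3 : PySem.Str.isIn "DDR3" (PySem.Str.upper m) <;>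
  cases h2 : PySem.Str.isIn "DDR2" (PySem.Str.upper m) <;> (try simp [h5, h4, h3, h2]) <;> decide

-- A's outer loop is List.any of the inner test
theorem outerA_eq_any (mb_type : String) (f : String → Bool)
    (h : ∀ m, pvInnerA mb_type ["DDR5", "DDR4", "DDR3", "DDR2"] m = f m) :
    ∀ items : List (String × String × String × String × String × String),
      pvOuterA mb_type items = items.any (fun it => f it.2.2.1) := by
  intro items
  induction items with
  | nil => rfl
  | cons it rest ih =>
    simp only [pvOuterA, List.any_cons, h, ih]
    cases f it.2.2.1 <;> simp

-- the allowed-types disjunction equals B's existential, for each motherboard digit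
theorem pvAllowed5 (m : String) :
    (["DDR2", "DDR3", "DDR4", "DDR5"].any (fun t => PySem.Str.isIn t (PySem.Str.upper m)))
    = decide (∃ v ∈ pvDdrScan (PySem.Str.upper m).toList, v ≤ (5:Int)) := by
  rw [Bool.eq_iff_iff]
  simp only [List.any_eq_true, List.mem_cons, List.not_mem_nil, decide_eq_true_eq]
  constructor
  · rintro ⟨t, ht, hin⟩
    rcases ht with rfl | rfl | rfl | rfl | h
    · exact ⟨2, (mem_scan_2 _ ▸ hin : _), by norm_num⟩
    · exact ⟨3, (mem_scan_3 _ ▸ hin : _), by norm_num⟩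
    · exact ⟨4, (mem_scan_4 _ ▸ hin : _), by norm_num⟩
    · exact ⟨5, (mem_scan_5 _ ▸ hin : _), by norm_num⟩
    · exact absurd h (by simp)
  · rintro ⟨v, hv, hle⟩
    rcases pvDdrScan_bounds _ v hv with rfl | rfl | rfl | rfl
    · exact ⟨"DDR2", by simp, (mem_scan_2 _ ▸ hv : _)⟩
    · exact ⟨"DDR3", by simp, (mem_scan_3 _ ▸ hv : _)⟩
    · exact ⟨"DDR4", by simp, (mem_scan_4 _ ▸ hv : _)⟩
    · exact ⟨"DDR5", by simp, (mem_scan_5 _ ▸ hv : _)⟩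

theorem pvAllowed4 (m : String) :
    (["DDR2", "DDR3", "DDR4"].any (fun t => PySem.Str.isIn t (PySem.Str.upper m)))
    = decide (∃ v ∈ pvDdrScan (PySem.Str.upper m).toList, v ≤ (4:Int)) := by
  rw [Bool.eq_iff_iff]
  simp only [List.any_eq_true, List.mem_cons, List.not_mem_nil, decide_eq_true_eq]
  constructor
  · rintro ⟨t, ht, hin⟩
    rcases ht with rfl | rfl | rfl | h
    · exact ⟨2, (mem_scan_2 _ ▸ hin : _), by norm_num⟩
    · exact ⟨3, (mem_scan_3 _ ▸ hin : _), by norm_num⟩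
    · exact ⟨4, (mem_scan_4 _ ▸ hin : _), by norm_num⟩
    · exact absurd h (by simp)
  · rintro ⟨v, hv, hle⟩
    rcases pvDdrScan_bounds _ v hv with rfl | rfl | rfl | rfl
    · exact ⟨"DDR2", by simp, (mem_scan_2 _ ▸ hv : _)⟩
    · exact ⟨"DDR3", by simp, (mem_scan_3 _ ▸ hv : _)⟩
    · exact ⟨"DDR4", by simp, (mem_scan_4 _ ▸ hv : _)⟩
    · exact absurd hle (by norm_num)

theorem pvAllowed3 (m : String) :
    (["DDR2", "DDR3"].any (fun t => PySem.Str.isIn t (PySem.Str.upper m)))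
    = decide (∃ v ∈ pvDdrScan (PySem.Str.upper m).toList, v ≤ (3:Int)) := by
  rw [Bool.eq_iff_iff]
  simp only [List.any_eq_true, List.mem_cons, List.not_mem_nil, decide_eq_true_eq]
  constructor
  · rintro ⟨t, ht, hin⟩
    rcases ht with rfl | rfl | h
    · exact ⟨2, (mem_scan_2 _ ▸ hin : _), by norm_num⟩
    · exact ⟨3, (mem_scan_3 _ ▸ hin : _), by norm_num⟩
    · exact absurd h (by simp)
  · rintro ⟨v, hv, hle⟩
    rcases pvDdrScan_bounds _ v hv with rfl | rfl | rfl | rfl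
    · exact ⟨"DDR2", by simp, (mem_scan_2 _ ▸ hv : _)⟩
    · exact ⟨"DDR3", by simp, (mem_scan_3 _ ▸ hv : _)⟩
    · exact absurd hle (by norm_num)
    · exact absurd hle (by norm_num)

theorem pvAllowed2 (m : String) :
    (["DDR2"].any (fun t => PySem.Str.isIn t (PySem.Str.upper m)))
    = decide (∃ v ∈ pvDdrScan (PySem.Str.upper m).toList, v ≤ (2:Int)) := by
  rw [Bool.eq_iff_iff]
  simp only [List.any_eq_true, List.mem_cons, List.not_mem_nil, decide_eq_true_eq]
  constructor
  · rintro ⟨t, ht, hin⟩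
    rcases ht with rfl | h
    · exact ⟨2, (mem_scan_2 _ ▸ hin : _), by norm_num⟩
    · exact absurd h (by simp)
  · rintro ⟨v, hv, hle⟩
    rcases pvDdrScan_bounds _ v hv with rfl | rfl | rfl | rfl
    · exact ⟨"DDR2", by simp, (mem_scan_2 _ ▸ hv : _)⟩
    · exact absurd hle (by norm_num)
    · exact absurd hle (by norm_num)
    · exact absurd hle (by norm_num)

-- ===== VERDICT (by name: the statement is the Claim_ definition above) =====
theorem memory_compatible_spec : Claim_equal_memory_compatible := by
  intro mb items _
  unfold Spec_memory_compatible memory_compatible memory_compatible_alt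
  by_cases h5 : PySem.Str.isIn "DDR5" (PySem.Str.upper mb) = true
  · have hmax : PySem.List.max? (pvDdrScan (PySem.Str.upper mb).toList) (fun x => x) = some 5 := by
      apply pvMax?_eq
      · rw [mem_scan_5]; exact h5
      · intro v hv
        rcases pvDdrScan_bounds _ v hv with rfl | rfl | rfl | rfl <;> norm_num
    simp only [pvDetectA, h5, if_true, hmax]
    rw [outerA_eq_any "DDR5" _ (fun m => (innerA_DDR5 m).trans (pvAllowed5 m))]
    simp only [pvMinTest]
  · rw [Bool.not_eq_true] at h5
    by_cases h4 : PySem.Str.isIn "DDR4" (PySem.Str.upper mb) = true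
    · have hmax : PySem.List.max? (pvDdrScan (PySem.Str.upper mb).toList) (fun x => x) = some 4 := by
        apply pvMax?_eq
        · rw [mem_scan_4]; exact h4
        · intro v hv
          rcases pvDdrScan_bounds _ v hv with rfl | rfl | rfl | rfl
          · norm_num
          · norm_num
          · norm_num
          · exfalso; have h := (mem_scan_5 (PySem.Str.upper mb)) ▸ hv; rw [h5] at h; exact Bool.false_ne_true h
      simp only [pvDetectA, h5, h4, Bool.false_eq_true, if_false, if_true, hmax]
      rw [outerA_eq_any "DDR4" _ (fun m => (innerA_DDR4 m).trans (pvAllowed4 m))]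
      simp only [pvMinTest]
    · rw [Bool.not_eq_true] at h4
      by_cases h3 : PySem.Str.isIn "DDR3" (PySem.Str.upper mb) = true
      · have hmax : PySem.List.max? (pvDdrScan (PySem.Str.upper mb).toList) (fun x => x) = some 3 := by
          apply pvMax?_eq
          · rw [mem_scan_3]; exact h3
          · intro v hv
            rcases pvDdrScan_bounds _ v hv with rfl | rfl | rfl | rfl
            · norm_num
            · norm_num
            · exfalso; have h := (mem_scan_4 (PySem.Str.upper mb)) ▸ hv; rw [h4] at h; exact Bool.false_ne_true h
            · exfalso; have h := (mem_scan_5 (PySem.Str.upper mb)) ▸ hv; rw [h5] at h; exact Bool.false_ne_true h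
        simp only [pvDetectA, h5, h4, h3, Bool.false_eq_true, if_false, if_true, hmax]
        rw [outerA_eq_any "DDR3" _ (fun m => (innerA_DDR3 m).trans (pvAllowed3 m))]
        simp only [pvMinTest]
      · rw [Bool.not_eq_true] at h3
        by_cases h2 : PySem.Str.isIn "DDR2" (PySem.Str.upper mb) = true
        · have hmax : PySem.List.max? (pvDdrScan (PySem.Str.upper mb).toList) (fun x => x) = some 2 := by
            apply pvMax?_eq
            · rw [mem_scan_2]; exact h2
            · intro v hv
              rcases pvDdrScan_bounds _ v hv with rfl | rfl | rfl | rfl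
              · norm_num
              · exfalso; have h := (mem_scan_3 (PySem.Str.upper mb)) ▸ hv; rw [h3] at h; exact Bool.false_ne_true h
              · exfalso; have h := (mem_scan_4 (PySem.Str.upper mb)) ▸ hv; rw [h4] at h; exact Bool.false_ne_true h
              · exfalso; have h := (mem_scan_5 (PySem.Str.upper mb)) ▸ hv; rw [h5] at h; exact Bool.false_ne_true h
          simp only [pvDetectA, h5, h4, h3, h2, Bool.false_eq_true, if_false, if_true, hmax]
          rw [outerA_eq_any "DDR2" _ (fun m => (innerA_DDR2 m).trans (pvAllowed2 m))]
          simp only [pvMinTest]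
        · rw [Bool.not_eq_true] at h2
          have hnil : pvDdrScan (PySem.Str.upper mb).toList = [] := by
            rw [List.eq_nil_iff_forall_not_mem]
            intro v hv
            rcases pvDdrScan_bounds _ v hv with rfl | rfl | rfl | rfl
            · have h := (mem_scan_2 (PySem.Str.upper mb)) ▸ hv; rw [h2] at h; exact Bool.false_ne_true h
            · have h := (mem_scan_3 (PySem.Str.upper mb)) ▸ hv; rw [h3] at h; exact Bool.false_ne_true h
            · have h := (mem_scan_4 (PySem.Str.upper mb)) ▸ hv; rw [h4] at h; exact Bool.false_ne_true h
            · have h := (mem_scan_5 (PySem.Str.upper mb)) ▸ hv; rw [h5] at h; exact Bool.false_ne_true h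
          simp only [PySem.Str.isIn_eq, PySem.Str.toList_upper,
            show "DDR5".toList = ['D','D','R','5'] from rfl,
            show "DDR4".toList = ['D','D','R','4'] from rfl,
            show "DDR3".toList = ['D','D','R','3'] from rfl,
            show "DDR2".toList = ['D','D','R','2'] from rfl] at h5 h4 h3 h2 hnil
          simp [pvDetectA, h5, h4, h3, h2, hnil, PySem.List.max?]
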